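-- pv_equiv track=rewrite | github.com/yoon2000/QMmethod_project-row-col- | Quine-McCluskey Method.py | except_pi_minterm
-- ===== SOURCE A (Python) =====
-- import math
--
-- def except_pi_minterm(pi, cnt_pi):
--     _num = pi.count('-')
--     for j in range(int(math.pow(2, _num))):
--         cp_pi = pi
--         bin_min = bin(j)[2:]
--         while (len(bin_min) < _num):
--             bin_min = '0' + bin_min
--         for k in range(_num):
--             idx = cp_pi.find('-')
--             cp_pi = cp_pi[:idx] + bin_min[k] + cp_pi[idx + 1:]
--         cnt_pi[int(cp_pi, 2)].clear()
--     return cnt_pi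
-- ===== SOURCE B (Python) =====
-- def except_pi_minterm(pi, cnt_pi):
--     # Different decomposition: recursively expand the dashes of pi into the set of
--     # covered minterms first, then clear each covered entry once.
--     def covered(s):
--         i = s.find('-')
--         if i < 0:
--             return {int(s, 2)}
--         return covered(s[:i] + '0' + s[i + 1:]) | covered(s[:i] + '1' + s[i + 1:])
--     for m in covered(pi):
--         cnt_pi[m].clear()
--     return cnt_pi
-- ===== Notes on version B (the rewrite author's own statement) =====
-- stated objective: alternative
-- what changed: Replaces A's enumerate-integers loop (bin(j), zero-padding, repeated find/substitute per iteration) by a recursive expansion of the first '-' into '0' and '1' that collects the covered minterms into a set, which is then cleared in one pass.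
import Mathlib
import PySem

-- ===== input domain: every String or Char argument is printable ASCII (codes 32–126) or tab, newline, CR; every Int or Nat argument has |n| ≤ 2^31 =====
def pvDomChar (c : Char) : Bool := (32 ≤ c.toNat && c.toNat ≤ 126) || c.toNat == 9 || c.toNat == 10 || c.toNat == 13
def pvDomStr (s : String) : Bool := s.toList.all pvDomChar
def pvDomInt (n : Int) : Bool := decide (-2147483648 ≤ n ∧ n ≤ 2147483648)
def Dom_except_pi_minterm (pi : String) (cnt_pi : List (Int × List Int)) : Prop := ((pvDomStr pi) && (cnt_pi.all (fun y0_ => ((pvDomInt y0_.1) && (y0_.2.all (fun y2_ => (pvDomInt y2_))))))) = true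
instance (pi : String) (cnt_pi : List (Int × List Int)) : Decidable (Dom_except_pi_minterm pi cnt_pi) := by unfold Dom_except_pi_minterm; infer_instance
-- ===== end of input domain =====

-- B first collects the covered minterms by recursive dash expansion into a set, then clears each
-- covered entry once (A enumerates integers and substitutes + clears per iteration). Both versions
-- empty the stored lists of cnt_pi in place; the equivalence proved is about the returned table.


-- ===== PORT A =====

-- A helper: `cnt_pi[k].clear()` — empties the list stored under key k (first matching entry)
def pvClearKey (k : Int) : List (Int × List Int) → List (Int × List Int)
  | [] => []
  | (a, v) :: rest => if a = k then (a, []) :: rest else (a, v) :: pvClearKey k rest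

-- A helpers: `int(s, 2)` with CPython's exact rules — surrounding whitespace, an optional
-- '+' sign (a '-' sign can never reach int() here: every '-' of pi is substituted first), an
-- optional '0b'/'0B' prefix (optionally followed by one '_'), and binary digits separated by
-- single underscores; none = ValueError
def pvBit? (c : Char) : Option Int :=
  if c = '0' then some 0 else if c = '1' then some 1 else none

def pvDigitsGo (acc : Int) : List Char → Option Int
  | [] => some acc
  | '_' :: c :: rest =>
      match pvBit? c with
      | some b => pvDigitsGo (2 * acc + b) rest
      | none => none
  | ['_'] => none
  | c :: rest =>
      match pvBit? c with
      | some b => pvDigitsGo (2 * acc + b) rest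
      | none => none

def pvDigits? : List Char → Option Int
  | [] => none
  | c :: rest =>
      match pvBit? c with
      | some b => pvDigitsGo b rest
      | none => none

def pvIsSpace (c : Char) : Bool := c = ' ' || c = '\t' || c = '\n' || c = '\r'

def pvParseBin? (s : List Char) : Option Int :=
  let t := ((s.dropWhile pvIsSpace).reverse.dropWhile pvIsSpace).reverse  -- s.strip()
  let t := match t with
    | '+' :: rest => rest
    | _ => t
  match t with
  | '0' :: 'b' :: u => pvDigits? (match u with | '_' :: u' => u' | _ => u)
  | '0' :: 'B' :: u => pvDigits? (match u with | '_' :: u' => u' | _ => u)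
  | _ => pvDigits? t

-- `int(s, 2)` as A uses it: a parse failure makes Python raise ValueError, which Pre_
-- excludes, so the default 0 is arbitrary and unreachable inside Pre_
def pvParseBin (s : List Char) : Int := (pvParseBin? s).getD 0

-- `bin(j)[2:]` for j > 0, most significant digit first, exactly as Python prints it;
-- the first argument is a structural-recursion bound (call with fuel = j; j/2 < j keeps it valid)
def pvBinAux : Nat → Nat → List Char
  | 0, _ => []
  | fuel + 1, j =>
      if j = 0 then []
      else pvBinAux fuel (j / 2) ++ [if j % 2 = 1 then '1' else '0']

-- `bin(j)[2:]` for j ≥ 0 (bin(0) = '0b0')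
def pvBin (j : Nat) : List Char := if j = 0 then ['0'] else pvBinAux j j

-- `while len(bin_min) < num: bin_min = '0' + bin_min` — the loop prepends '0' exactly
-- (num - len) times; that iteration count is made explicit for structural recursion
def pvPadAux : Nat → List Char → List Char
  | 0, s => s
  | k + 1, s => pvPadAux k ('0' :: s)

def pvPad (n : Nat) (s : List Char) : List Char := pvPadAux (n - s.length) s

-- `idx = cp.find('-'); cp = cp[:idx] + b + cp[idx+1:]` (idx ≥ 0 here: A only executes this while a
-- dash remains, so Python's find never returns -1 on this path; ported as the identity there)
def pvRep1 (cp : List Char) (b : Char) : List Char :=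
  match List.idxOf? '-' cp with
  | some idx => cp.take idx ++ [b] ++ cp.drop (idx + 1)
  | none => cp

def except_pi_minterm (pi : String) (cnt_pi : List (Int × List Int)) : List (Int × List Int) :=
  let s := pi.toList
  let num := s.count '-'                       -- _num = pi.count('-')
  -- for j in range(int(math.pow(2, _num))): math.pow(2, _num) is exactly 2 ^ _num for _num ≤ 1023
  -- (guaranteed by Pre_; Python raises OverflowError beyond that)
  (List.range (2 ^ num)).foldl
    (fun d j =>
      let bin_min := pvPad num (pvBin j)       -- bin(j)[2:], zero-padded on the left
      -- for k in range(_num): replace the first '-' of cp by bin_min[k]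
      let cp := (List.range num).foldl (fun cp k => pvRep1 cp (bin_min.getD k ' ')) s
      pvClearKey (pvParseBin cp) d)            -- cnt_pi[int(cp_pi, 2)].clear()
    cnt_pi

-- ===== PORT B =====

-- B helpers: its own model of `int(s, 2)` — a left-to-right state machine folded once over the
-- characters (exact for the same CPython rules as A's helper; proved equal to it below)
inductive PvPSt : Type
  | lead                -- in the leading whitespace
  | signed              -- just consumed '+'
  | zero                -- consumed exactly "0" (a 0b/0B prefix is still possible)
  | pre                 -- consumed the prefix "0b"/"0B"
  | preU                -- consumed "0b_"/"0B_"
  | dig (acc : Int)     -- inside the digits, last char a digit, value so far acc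
  | und (acc : Int)     -- last char an '_' that followed a digit
  | trail (acc : Int)   -- in the trailing whitespace
  | bad                 -- no valid continuation
deriving DecidableEq, Repr

def pvWs (c : Char) : Bool := c = ' ' || c = '\t' || c = '\n' || c = '\r'

def pvStep (st : PvPSt) (c : Char) : PvPSt :=
  match st with
  | .lead =>
      if pvWs c then .lead
      else if c = '+' then .signed
      else if c = '0' then .zero
      else if c = '1' then .dig 1
      else .bad
  | .signed =>
      if c = '0' then .zero else if c = '1' then .dig 1 else .bad
  | .zero =>
      if c = 'b' ∨ c = 'B' then .pre
      else if c = '0' then .dig 0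
      else if c = '1' then .dig 1
      else if c = '_' then .und 0
      else if pvWs c then .trail 0
      else .bad
  | .pre =>
      if c = '_' then .preU
      else if c = '0' then .dig 0
      else if c = '1' then .dig 1
      else .bad
  | .preU =>
      if c = '0' then .dig 0 else if c = '1' then .dig 1 else .bad
  | .dig a =>
      if c = '0' then .dig (2 * a)
      else if c = '1' then .dig (2 * a + 1)
      else if c = '_' then .und a
      else if pvWs c then .trail a
      else .bad
  | .und a =>
      if c = '0' then .dig (2 * a) else if c = '1' then .dig (2 * a + 1) else .bad
  | .trail a => if pvWs c then .trail a else .bad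
  | .bad => .bad

def pvFin : PvPSt → Option Int
  | .zero => some 0
  | .dig a => some a
  | .trail a => some a
  | _ => none

-- B's `int(s, 2)` (default 0 unreachable inside Pre_, as on A's side)
def pvParseB (s : List Char) : Int := (pvFin (s.foldl pvStep .lead)).getD 0

-- B's `covered(s)`: the set of minterms covered by s, by expanding the first '-' into '0' and '1'
-- and taking the union; fuel = dash count makes the recursion structural (0-fuel branch unreachable)
def pvCovered : Nat → List Char → PySem.Set Int
  | fuel, s =>
    match List.idxOf? '-' s, fuel with
    | none, _ => [pvParseB s]                                         -- {int(s, 2)}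
    | some _, 0 => []
    | some i, f + 1 =>
        PySem.Set.union (pvCovered f (s.take i ++ ['0'] ++ s.drop (i + 1)))
                        (pvCovered f (s.take i ++ ['1'] ++ s.drop (i + 1)))

def except_pi_minterm_alt (pi : String) (cnt_pi : List (Int × List Int)) : List (Int × List Int) :=
  -- for m in covered(pi): cnt_pi[m].clear()  (clearing is order-independent, so the set's
  -- unmodelled iteration order cannot influence the result)
  (pvCovered (pi.toList.count '-') pi.toList).foldl (fun d m => pvClearKey m d) cnt_pi

-- ===== PRECONDITION & SPEC =====

-- all 0/1 strings of length n, in the order both programs visit them (first character slowest)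
def pvAllBits : Nat → List (List Char)
  | 0 => [[]]
  | n + 1 => (pvAllBits n).map (fun t => '0' :: t) ++ (pvAllBits n).map (fun t => '1' :: t)

-- substitute the dashes of s, left to right, by the characters of bs
def pvSubstAll : List Char → List Char → List Char
  | [], _ => []
  | c :: r, bs =>
      if c = '-' then
        match bs with
        | b :: bs' => b :: pvSubstAll r bs'
        | [] => c :: pvSubstAll r []
      else c :: pvSubstAll r bs

-- shape helpers for Pre_ (and the proofs): strip trailing whitespace, the '+' sign, the 0b/0B
-- prefix (with its optional single '_') of a candidate literal
def pvRstrip (t : List Char) : List Char := (t.reverse.dropWhile pvIsSpace).reverse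

def pvSignStrip : List Char → List Char
  | '+' :: u => u
  | u => u

def pvDropU : List Char → List Char
  | '_' :: u => u
  | u => u

def pvDropPrefix : List Char → List Char
  | '0' :: 'b' :: u => pvDropU u
  | '0' :: 'B' :: u => pvDropU u
  | t => t

-- the digit body of a candidate base-2 literal, and its value
def pvLitBody (s : List Char) : List Char :=
  pvDropPrefix (pvSignStrip (pvRstrip (s.dropWhile pvIsSpace)))

def pvLitVal (b : List Char) : Int :=
  (b.filter (fun c => c ≠ '_')).foldl (fun a c => 2 * a + (if c = '1' then 1 else 0)) 0

-- a valid base-2 Python literal (no '-' can occur here): a nonempty run of 0/1 digits separated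
-- by single underscores, with no leading or trailing underscore
def pvValidLit (b : List Char) : Bool :=
  !b.isEmpty && b.all (fun c => c == '0' || c == '1' || c == '_') &&
    !(b.head? == some '_') && !(b.getLast? == some '_') &&
    (b.zip b.tail).all (fun p => !(p.1 == '_' && p.2 == '_'))

-- Pre_ = the inputs on which the Python A returns normally: every expansion of pi (dashes
-- replaced by bits) is a valid base-2 literal (otherwise int(cp,2) raises ValueError) whose value
-- is a key of cnt_pi (otherwise KeyError), at most 1023 dashes (otherwise math.pow(2,·) raises
-- OverflowError), and unique keys (duplicate keys cannot arise from a Python dict).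
def Pre_except_pi_minterm (pi : String) (cnt_pi : List (Int × List Int)) : Prop :=
  pi.toList.count '-' ≤ 1023 ∧ (cnt_pi.map Prod.fst).Nodup ∧
  (pvAllBits (pi.toList.count '-')).all (fun bs =>
    pvValidLit (pvLitBody (pvSubstAll pi.toList bs)) &&
    (cnt_pi.map Prod.fst).contains (pvLitVal (pvLitBody (pvSubstAll pi.toList bs)))) = true

instance (pi : String) (cnt_pi : List (Int × List Int)) : Decidable (Pre_except_pi_minterm pi cnt_pi) := by
  unfold Pre_except_pi_minterm; infer_instance

def pvWitness_except_pi_minterm : String × (List (Int × List Int)) :=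
  ("1-0", [(4, [1]), (6, [2]), (7, [9])])

def Spec_except_pi_minterm (pi : String) (cnt_pi : List (Int × List Int)) (out : List (Int × List Int)) : Prop := out = except_pi_minterm_alt pi cnt_pi
instance (pi : String) (cnt_pi : List (Int × List Int)) (out : List (Int × List Int)) : Decidable (Spec_except_pi_minterm pi cnt_pi out) := by unfold Spec_except_pi_minterm; infer_instance

-- ===== CLAIM (what is proved, stated in full; the proofs are below) =====
def Claim_equal_except_pi_minterm : Prop := ∀ (pi : String) (cnt_pi : List (Int × List Int)), Dom_except_pi_minterm pi cnt_pi → Pre_except_pi_minterm pi cnt_pi → Spec_except_pi_minterm pi cnt_pi (except_pi_minterm pi cnt_pi)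

-- ===== LEMMAS AND PROOFS =====

-- ---------- A-side characterisation (A = fold of pvClearKey over all expansions) ----------

theorem pvSubstAll_nil (s : List Char) : pvSubstAll s [] = s := by
  induction s with
  | nil => rfl
  | cons c r ih => by_cases h : c = '-' <;> simp [pvSubstAll, h, ih]

theorem pvRep1_some {s : List Char} {i : Nat} (h : List.idxOf? '-' s = some i) (b : Char) :
    pvRep1 s b = s.take i ++ [b] ++ s.drop (i + 1) := by
  simp [pvRep1, h]

-- substituting the first dash then the rest = substituting all at once
theorem pvSubstAll_rep1 (s : List Char) (b : Char) (bs : List Char)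
    (hs : 1 ≤ s.count '-') (hb : b ≠ '-') :
    pvSubstAll (pvRep1 s b) bs = pvSubstAll s (b :: bs) := by
  induction s with
  | nil => simp at hs
  | cons c r ih =>
    by_cases hc : c = '-'
    · subst hc
      have h0 : List.idxOf? '-' ('-' :: r) = some 0 := by simp [List.idxOf?_cons]
      rw [pvRep1_some h0]
      simp [pvSubstAll, hb]
    · have hr : 1 ≤ r.count '-' := by
        simpa [List.count_cons, hc] using hs
      have hmem : '-' ∈ r := List.count_pos_iff.mp hr
      obtain ⟨i, hi⟩ : ∃ i, List.idxOf? '-' r = some i := by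
        cases hir : List.idxOf? '-' r with
        | none => exact absurd (List.idxOf?_eq_none_iff.mp hir) (by simpa using hmem)
        | some i => exact ⟨i, rfl⟩
      have hci : List.idxOf? '-' (c :: r) = some (i + 1) := by
        simp [List.idxOf?_cons, hc, hi]
      rw [pvRep1_some hci]
      have : (c :: r).take (i + 1) ++ [b] ++ (c :: r).drop (i + 2) =
          c :: (r.take i ++ [b] ++ r.drop (i + 1)) := by simp
      rw [this, ← pvRep1_some hi]
      simp [pvSubstAll, hc, ih hr]

theorem pvRep1_count {s : List Char} (b : Char) (hs : 1 ≤ s.count '-') (hb : b ≠ '-') :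
    (pvRep1 s b).count '-' = s.count '-' - 1 := by
  have hmem : '-' ∈ s := List.count_pos_iff.mp hs
  obtain ⟨i, hi⟩ : ∃ i, List.idxOf? '-' s = some i := by
    cases hir : List.idxOf? '-' s with
    | none => exact absurd (List.idxOf?_eq_none_iff.mp hir) (by simpa using hmem)
    | some i => exact ⟨i, rfl⟩
  obtain ⟨hlen, hget, -⟩ := List.idxOf?_eq_some_iff.mp hi
  rw [pvRep1_some hi]
  conv_rhs => rw [← List.take_append_drop i s, List.drop_eq_getElem_cons hlen]
  simp [List.count_append, hget, hb]

-- A's inner loop, folded over the list of substituted bits, is pvSubstAll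
theorem pvFoldl_rep1 (bs : List Char) : ∀ (s : List Char),
    bs.length ≤ s.count '-' → (∀ b ∈ bs, b ≠ '-') →
    bs.foldl pvRep1 s = pvSubstAll s bs := by
  induction bs with
  | nil => intro s _ _; simp [pvSubstAll_nil]
  | cons b bs ih =>
    intro s hlen hb
    have hs : 1 ≤ s.count '-' := by simp at hlen; omega
    have hbd : b ≠ '-' := hb b (by simp)
    have hcnt : (pvRep1 s b).count '-' = s.count '-' - 1 := pvRep1_count b hs hbd
    have : bs.foldl pvRep1 (pvRep1 s b) = pvSubstAll (pvRep1 s b) bs := by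
      apply ih
      · rw [hcnt]; simp at hlen; omega
      · intro x hx; exact hb x (by simp [hx])
    simpa [List.foldl_cons, this] using pvSubstAll_rep1 s b bs hs hbd

-- reading bin_min by index over range n = folding over its first n characters
theorem pvFoldl_range_getD {α β : Type} (f : β → α → β) (dflt : α) :
    ∀ (n : Nat) (bs : List α) (b : β), n ≤ bs.length →
    (List.range n).foldl (fun x k => f x (bs.getD k dflt)) b = (bs.take n).foldl f b := by
  intro n
  induction n with
  | zero => intro bs b _; simp
  | succ m ih =>
    intro bs b h
    have hm : m < bs.length := by omega
    rw [List.range_succ, List.foldl_append, ih bs b (by omega), List.take_add_one,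
      List.getElem?_eq_getElem hm]
    simp only [List.foldl_append, Option.toList_some, List.foldl_cons, List.foldl_nil]
    rw [List.getD_eq_getElem bs dflt hm]

-- the binary digits of j written with exactly n digits, most significant first
def pvNatBits : Nat → Nat → List Char
  | 0, _ => []
  | n + 1, j => (if j < 2 ^ n then '0' else '1') :: pvNatBits n (j % 2 ^ n)

theorem pvNatBits_length (n : Nat) : ∀ j, (pvNatBits n j).length = n := by
  induction n with
  | zero => intro j; rfl
  | succ m ih => intro j; simp [pvNatBits, ih]

theorem pvNatBits_no_dash (n : Nat) : ∀ j b, b ∈ pvNatBits n j → b ≠ '-' := by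
  induction n with
  | zero => intro j b hb; simp [pvNatBits] at hb
  | succ m ih =>
    intro j b hb
    simp only [pvNatBits, List.mem_cons] at hb
    rcases hb with hb | hb
    · subst hb; split <;> decide
    · exact ih _ b hb

-- least-significant-digit characterisation of pvNatBits
theorem pvNatBits_lsb (n : Nat) : ∀ j, j < 2 ^ (n + 1) →
    pvNatBits (n + 1) j = pvNatBits n (j / 2) ++ [if j % 2 = 1 then '1' else '0'] := by
  induction n with
  | zero => intro j hj; interval_cases j <;> decide
  | succ m ih =>
    intro j _
    have hpos : (0:Nat) < 2 ^ (m + 1) := by positivity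
    have hm2 : j % 2 ^ (m + 1) < 2 ^ (m + 1) := Nat.mod_lt _ hpos
    have e1 : j % 2 ^ (m + 1) / 2 = j / 2 % 2 ^ m := by
      have h := Nat.mod_mul_right_div_self j 2 (2 ^ m)
      rwa [show 2 * 2 ^ m = 2 ^ (m + 1) by rw [pow_succ]; ring] at h
    have e2 : j % 2 ^ (m + 1) % 2 = j % 2 :=
      Nat.mod_mod_of_dvd j (dvd_pow_self 2 (Nat.succ_ne_zero m))
    have e3 : (j < 2 ^ (m + 1)) ↔ (j / 2 < 2 ^ m) := by
      rw [Nat.div_lt_iff_lt_mul (by omega : (0:Nat) < 2),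
        show 2 ^ m * 2 = 2 ^ (m + 1) by rw [pow_succ]]
    show (if j < 2 ^ (m + 1) then '0' else '1') :: pvNatBits (m + 1) (j % 2 ^ (m + 1)) = _
    rw [ih _ hm2, e1, e2]
    by_cases hcase : j < 2 ^ (m + 1)
    · have h4 := e3.mp hcase
      simp [pvNatBits, hcase, h4]
    · have h4 := (not_congr e3).mp hcase
      simp [pvNatBits, hcase, h4]

theorem pvMapNatBits (n : Nat) :
    (List.range (2 ^ n)).map (pvNatBits n) = pvAllBits n := by
  induction n with
  | zero => decide
  | succ m ih =>
    rw [show 2 ^ (m + 1) = 2 ^ m + 2 ^ m by rw [pow_succ]; ring, List.range_add,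
      List.map_append, List.map_map]
    have h1 : (List.range (2 ^ m)).map (pvNatBits (m + 1)) =
        ((List.range (2 ^ m)).map (pvNatBits m)).map (fun t => '0' :: t) := by
      rw [List.map_map]
      refine List.map_congr_left fun j hj => ?_
      have hj' : j < 2 ^ m := List.mem_range.mp hj
      show pvNatBits (m + 1) j = '0' :: pvNatBits m j
      rw [pvNatBits, if_pos hj', Nat.mod_eq_of_lt hj']
    have h2 : (List.range (2 ^ m)).map (pvNatBits (m + 1) ∘ fun x => 2 ^ m + x) =
        ((List.range (2 ^ m)).map (pvNatBits m)).map (fun t => '1' :: t) := by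
      rw [List.map_map]
      refine List.map_congr_left fun j hj => ?_
      have hj' : j < 2 ^ m := List.mem_range.mp hj
      show pvNatBits (m + 1) (2 ^ m + j) = '1' :: pvNatBits m j
      rw [pvNatBits, if_neg (by omega), Nat.add_mod_left, Nat.mod_eq_of_lt hj']
    rw [h1, h2, ih]
    rfl

theorem pvPadAux_eq (k : Nat) : ∀ s : List Char, pvPadAux k s = List.replicate k '0' ++ s := by
  induction k with
  | zero => intro s; rfl
  | succ m ih =>
    intro s
    rw [pvPadAux, ih ('0' :: s), List.replicate_succ']
    simp

theorem pvPad_eq (n : Nat) (s : List Char) :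
    pvPad n s = List.replicate (n - s.length) '0' ++ s := pvPadAux_eq _ s

theorem pvBinAux_zero : ∀ f, pvBinAux f 0 = [] := by
  intro f; cases f <;> simp [pvBinAux]

theorem pvBinAux_congr : ∀ (f1 f2 j : Nat), j ≤ f1 → j ≤ f2 → pvBinAux f1 j = pvBinAux f2 j := by
  intro f1
  induction f1 with
  | zero =>
    intro f2 j h1 _
    have : j = 0 := by omega
    subst this
    rw [pvBinAux_zero, pvBinAux_zero]
  | succ f ih =>
    intro f2 j h1 h2
    rcases Nat.eq_zero_or_pos j with rfl | hj
    · rw [pvBinAux_zero, pvBinAux_zero]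
    · obtain ⟨f2', rfl⟩ : ∃ k, f2 = k + 1 := ⟨f2 - 1, by omega⟩
      show pvBinAux (f + 1) j = pvBinAux (f2' + 1) j
      rw [pvBinAux, pvBinAux]
      simp only [if_neg (by omega : ¬ j = 0)]
      rw [ih f2' (j / 2) (by omega) (by omega)]

theorem pvBinAux_step (j : Nat) (h : 2 ≤ j) :
    pvBinAux j j = pvBinAux (j / 2) (j / 2) ++ [if j % 2 = 1 then '1' else '0'] := by
  obtain ⟨m, rfl⟩ : ∃ m, j = m + 1 := ⟨j - 1, by omega⟩
  rw [pvBinAux]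
  simp only [if_neg (by omega : ¬ m + 1 = 0)]
  rw [pvBinAux_congr m ((m + 1) / 2) ((m + 1) / 2) (by omega) (by omega)]

theorem pvPadBin : ∀ (n j : Nat), 1 ≤ n → j < 2 ^ n → pvPad n (pvBin j) = pvNatBits n j := by
  intro n
  induction n with
  | zero => intro j h; omega
  | succ m ih =>
    intro j hn hj
    rcases Nat.eq_zero_or_pos m with h0 | hm
    · subst h0
      interval_cases j <;> decide
    · have hj2 : j / 2 < 2 ^ m := by
        rw [Nat.div_lt_iff_lt_mul (by omega : (0:Nat) < 2)]
        calc j < 2 ^ (m + 1) := hj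
          _ = 2 ^ m * 2 := by rw [pow_succ]
      rw [pvNatBits_lsb m j hj, ← ih (j / 2) hm hj2]
      match j, hj with
      | 0, _ =>
        show pvPad (m + 1) (pvBin 0) = pvPad m (pvBin 0) ++ ['0']
        rw [pvBin, if_pos rfl, pvPad_eq, pvPad_eq]
        simp only [List.length_cons, List.length_nil]
        rw [show m + 1 - (0 + 1) = (m - (0 + 1)) + 1 by omega, List.replicate_succ']
      | 1, _ =>
        show pvPad (m + 1) (pvBin 1) = pvPad m (pvBin 0) ++ ['1']
        have hb1 : pvBin 1 = ['1'] := by decide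
        rw [hb1, pvBin, if_pos rfl, pvPad_eq, pvPad_eq]
        simp only [List.length_cons, List.length_nil]
        rw [show m + 1 - (0 + 1) = (m - (0 + 1)) + 1 by omega, List.replicate_succ']
      | (j2 + 2), _ =>
        rw [pvBin, if_neg (by omega), pvBin, if_neg (by omega),
          pvBinAux_step (j2 + 2) (by omega), pvPad_eq, pvPad_eq]
        have hlen : m + 1 - (pvBinAux ((j2 + 2) / 2) ((j2 + 2) / 2) ++
            [if (j2 + 2) % 2 = 1 then '1' else '0']).length
            = m - (pvBinAux ((j2 + 2) / 2) ((j2 + 2) / 2)).length := by simp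
        rw [hlen]
        simp

-- A is the fold of pvClearKey over all expansions of pi, first dash varying slowest
theorem pvA_eq (pi : String) (cnt_pi : List (Int × List Int)) :
    except_pi_minterm pi cnt_pi =
      (pvAllBits (pi.toList.count '-')).foldl
        (fun d bs => pvClearKey (pvParseBin (pvSubstAll pi.toList bs)) d) cnt_pi := by
  unfold except_pi_minterm
  rw [← pvMapNatBits (pi.toList.count '-'), List.foldl_map]
  dsimp only
  refine PySem.List.foldl_congr_mem _ _ _ _ ?_
  intro d j hj
  have hj' : j < 2 ^ (pi.toList.count '-') := List.mem_range.mp hj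
  congr 1
  set num := pi.toList.count '-' with hnum
  have hlen : num ≤ (pvPad num (pvBin j)).length := by
    rw [pvPad_eq]; simp; omega
  rw [pvFoldl_range_getD pvRep1 ' ' num (pvPad num (pvBin j)) pi.toList hlen]
  have htake : (pvPad num (pvBin j)).take num = pvNatBits num j := by
    rcases Nat.eq_zero_or_pos num with h0 | hpos
    · rw [h0]; simp [pvNatBits]
    · rw [pvPadBin num j hpos hj', List.take_of_length_le (by rw [pvNatBits_length])]
  rw [htake]
  exact congrArg pvParseBin (pvFoldl_rep1 (pvNatBits num j) pi.toList
    (by rw [pvNatBits_length]) (pvNatBits_no_dash num j))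

-- ---------- the two models of int(s, 2) agree ----------

theorem pvWs_eq : pvWs = pvIsSpace := rfl

theorem pvRstrip_cons_not_ws {c : Char} (h : pvIsSpace c = false) (r : List Char) :
    pvRstrip (c :: r) = c :: pvRstrip r := by
  unfold pvRstrip
  rw [List.reverse_cons, List.dropWhile_append]
  split
  · next he =>
      simp only [List.isEmpty_iff] at he
      simp [List.dropWhile, h, he]
  · simp


theorem pvRstrip_cons_ws {c : Char} (h : pvIsSpace c = true) (r : List Char) :
    pvRstrip (c :: r) = if pvRstrip r = [] then [] else c :: pvRstrip r := by
  unfold pvRstrip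
  rw [List.reverse_cons, List.dropWhile_append]
  split
  · next he =>
      simp only [List.isEmpty_iff] at he
      simp [List.dropWhile, h, he]
  · next he =>
      simp only [List.isEmpty_iff] at he
      have : ¬ ((List.dropWhile pvIsSpace r.reverse).reverse = []) := by
        simpa using he
      simp [this]


theorem pvRstrip_eq_nil_iff (r : List Char) : pvRstrip r = [] ↔ r.all pvIsSpace := by
  unfold pvRstrip
  rw [List.reverse_eq_nil_iff, List.dropWhile_eq_nil_iff, List.all_eq_true]
  constructor
  · intro h x hx; exact h x (by simpa using hx)
  · intro h x hx; exact h x (by simpa using hx)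


theorem pvFoldl_bad (t : List Char) : t.foldl pvStep .bad = .bad := by
  induction t with
  | nil => rfl
  | cons c r ih => simpa [pvStep] using ih

theorem pvFoldl_trail (t : List Char) : ∀ a : Int,
    pvFin (t.foldl pvStep (.trail a)) = if t.all pvIsSpace then some a else none := by
  induction t with
  | nil => intro a; simp [pvFin]
  | cons c r ih =>
    intro a
    by_cases h : pvWs c
    · simp [List.foldl_cons, pvStep, h, ih a, ← pvWs_eq]
    · simp [List.foldl_cons, pvStep, h, pvFoldl_bad, pvFin, ← pvWs_eq]



theorem pvGo0 (a : Int) (v : List Char) : pvDigitsGo a ('0' :: v) = pvDigitsGo (2 * a) v := by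
  simp [pvDigitsGo, pvBit?]

theorem pvGo1 (a : Int) (v : List Char) : pvDigitsGo a ('1' :: v) = pvDigitsGo (2 * a + 1) v := by
  simp [pvDigitsGo, pvBit?]

theorem pvGo_bad (a : Int) (c : Char) (v : List Char) (h : pvBit? c = none) (hu : c ≠ '_') :
    pvDigitsGo a (c :: v) = none := by
  rw [pvDigitsGo.eq_def]
  split <;> simp_all

theorem pvGoU0 (a : Int) (v : List Char) :
    pvDigitsGo a ('_' :: '0' :: v) = pvDigitsGo (2 * a) v := by
  simp [pvDigitsGo, pvBit?]

theorem pvGoU1 (a : Int) (v : List Char) :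
    pvDigitsGo a ('_' :: '1' :: v) = pvDigitsGo (2 * a + 1) v := by
  simp [pvDigitsGo, pvBit?]

theorem pvGoU_bad (a : Int) (c : Char) (v : List Char) (h : pvBit? c = none) :
    pvDigitsGo a ('_' :: c :: v) = none := by
  rw [pvDigitsGo.eq_def]
  split <;>
    first
      | (rename_i hno hone heq
         injection heq with hh1 hh2
         exact absurd hh2.symm (hno c v hh1.symm))
      | simp_all

theorem pvBit?_none_of_ws (c : Char) (h : pvWs c = true) : pvBit? c = none := by
  simp only [pvWs, Bool.or_eq_true, decide_eq_true_eq] at h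
  rcases h with ((h | h) | h) | h <;> subst h <;> rfl

theorem pvFoldl_digund (t : List Char) : ∀ a : Int,
    pvFin (t.foldl pvStep (.dig a)) = pvDigitsGo a (pvRstrip t) ∧
    pvFin (t.foldl pvStep (.und a)) = pvDigitsGo a ('_' :: pvRstrip t) := by
  induction t with
  | nil =>
    intro a
    constructor <;> rfl
  | cons c r ih =>
    intro a
    by_cases h0 : c = '0'
    · subst h0
      refine ⟨?_, ?_⟩
      · rw [List.foldl_cons, show pvStep (.dig a) '0' = .dig (2 * a) from rfl, (ih (2 * a)).1,
          pvRstrip_cons_not_ws (by decide) r, pvGo0]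
      · rw [List.foldl_cons, show pvStep (.und a) '0' = .dig (2 * a) from rfl, (ih (2 * a)).1,
          pvRstrip_cons_not_ws (by decide) r, pvGoU0]
    · by_cases h1 : c = '1'
      · subst h1
        refine ⟨?_, ?_⟩
        · rw [List.foldl_cons, show pvStep (.dig a) '1' = .dig (2 * a + 1) from rfl,
            (ih (2 * a + 1)).1, pvRstrip_cons_not_ws (by decide) r, pvGo1]
        · rw [List.foldl_cons, show pvStep (.und a) '1' = .dig (2 * a + 1) from rfl,
            (ih (2 * a + 1)).1, pvRstrip_cons_not_ws (by decide) r, pvGoU1]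
      · by_cases hu : c = '_'
        · subst hu
          refine ⟨?_, ?_⟩
          · rw [List.foldl_cons, show pvStep (.dig a) '_' = .und a from rfl, (ih a).2,
              pvRstrip_cons_not_ws (by decide) r]
          · rw [List.foldl_cons, show pvStep (.und a) '_' = .bad from rfl, pvFoldl_bad,
              pvRstrip_cons_not_ws (by decide) r, pvGoU_bad a '_' _ rfl]
            rfl
        · by_cases hw : pvWs c
          · have hsp : pvIsSpace c = true := by rw [← pvWs_eq]; exact hw
            have hbit : pvBit? c = none := pvBit?_none_of_ws c hw
            have hstep1 : pvStep (.dig a) c = .trail a := by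
              simp [pvStep, h0, h1, hu, hw]
            have hstep2 : pvStep (.und a) c = .bad := by
              simp [pvStep, h0, h1]
            refine ⟨?_, ?_⟩
            · rw [List.foldl_cons, hstep1, pvFoldl_trail r a, pvRstrip_cons_ws hsp r]
              by_cases hnil : pvRstrip r = []
              · rw [if_pos hnil, if_pos ((pvRstrip_eq_nil_iff r).mp hnil)]
                rfl
              · rw [if_neg hnil, if_neg (fun hall => hnil ((pvRstrip_eq_nil_iff r).mpr hall)),
                  pvGo_bad a c _ hbit hu]
            · rw [List.foldl_cons, hstep2, pvFoldl_bad, pvRstrip_cons_ws hsp r]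
              by_cases hnil : pvRstrip r = []
              · rw [if_pos hnil]
                rfl
              · rw [if_neg hnil, pvGoU_bad a c _ hbit]
                rfl
          · have hsp : pvIsSpace c = false := by rw [← pvWs_eq]; exact (Bool.not_eq_true _).mp hw
            have hbit : pvBit? c = none := by simp [pvBit?, h0, h1]
            have hstep1 : pvStep (.dig a) c = .bad := by
              simp [pvStep, h0, h1, hu, hw]
            have hstep2 : pvStep (.und a) c = .bad := by
              simp [pvStep, h0, h1]
            refine ⟨?_, ?_⟩
            · rw [List.foldl_cons, hstep1, pvFoldl_bad,
                pvRstrip_cons_not_ws hsp r, pvGo_bad a c _ hbit hu]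
              rfl
            · rw [List.foldl_cons, hstep2, pvFoldl_bad,
                pvRstrip_cons_not_ws hsp r, pvGoU_bad a c _ hbit]
              rfl



theorem pvD0 (v : List Char) : pvDigits? ('0' :: v) = pvDigitsGo 0 v := by
  simp [pvDigits?, pvBit?]

theorem pvD1 (v : List Char) : pvDigits? ('1' :: v) = pvDigitsGo 1 v := by
  simp [pvDigits?, pvBit?]

theorem pvD_bad (c : Char) (v : List Char) (h : pvBit? c = none) : pvDigits? (c :: v) = none := by
  simp [pvDigits?, h]

theorem pvFoldl_preU (t : List Char) :
    pvFin (t.foldl pvStep .preU) = pvDigits? (pvRstrip t) := by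
  cases t with
  | nil => rfl
  | cons c r =>
    by_cases h0 : c = '0'
    · subst h0
      rw [List.foldl_cons, show pvStep .preU '0' = .dig 0 from rfl, (pvFoldl_digund r 0).1,
        pvRstrip_cons_not_ws (by decide) r, pvD0]
    · by_cases h1 : c = '1'
      · subst h1
        rw [List.foldl_cons, show pvStep .preU '1' = .dig 1 from rfl, (pvFoldl_digund r 1).1,
          pvRstrip_cons_not_ws (by decide) r, pvD1]
      · have hbit : pvBit? c = none := by simp [pvBit?, h0, h1]
        have hstep : pvStep .preU c = .bad := by simp [pvStep, h0, h1]
        rw [List.foldl_cons, hstep, pvFoldl_bad]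
        by_cases hw : pvIsSpace c
        · rw [pvRstrip_cons_ws hw r]
          by_cases hnil : pvRstrip r = []
          · rw [if_pos hnil]; rfl
          · rw [if_neg hnil, pvD_bad c _ hbit]
            rfl
        · rw [pvRstrip_cons_not_ws ((Bool.not_eq_true _).mp hw) r, pvD_bad c _ hbit]
          rfl



theorem pvDropU_not_underscore {c : Char} (h : c ≠ '_') (u : List Char) :
    pvDropU (c :: u) = c :: u := by
  rw [pvDropU.eq_def]
  split <;> simp_all

theorem pvFoldl_pre (t : List Char) :
    pvFin (t.foldl pvStep .pre) = pvDigits? (pvDropU (pvRstrip t)) := by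
  cases t with
  | nil => rfl
  | cons c r =>
    by_cases hu : c = '_'
    · subst hu
      rw [List.foldl_cons, show pvStep .pre '_' = .preU from rfl, pvFoldl_preU r,
        pvRstrip_cons_not_ws (by decide) r]
      rfl
    · by_cases h0 : c = '0'
      · subst h0
        rw [List.foldl_cons, show pvStep .pre '0' = .dig 0 from rfl, (pvFoldl_digund r 0).1,
          pvRstrip_cons_not_ws (by decide) r, pvDropU_not_underscore (show ('0':Char) ≠ '_' by decide), pvD0]
      · by_cases h1 : c = '1'
        · subst h1
          rw [List.foldl_cons, show pvStep .pre '1' = .dig 1 from rfl, (pvFoldl_digund r 1).1,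
            pvRstrip_cons_not_ws (by decide) r, pvDropU_not_underscore (show ('1':Char) ≠ '_' by decide), pvD1]
        · have hbit : pvBit? c = none := by simp [pvBit?, h0, h1]
          have hstep : pvStep .pre c = .bad := by simp [pvStep, hu, h0, h1]
          rw [List.foldl_cons, hstep, pvFoldl_bad]
          by_cases hw : pvIsSpace c
          · rw [pvRstrip_cons_ws hw r]
            by_cases hnil : pvRstrip r = []
            · rw [if_pos hnil]; rfl
            · rw [if_neg hnil, pvDropU_not_underscore hu, pvD_bad c _ hbit]
              rfl
          · rw [pvRstrip_cons_not_ws ((Bool.not_eq_true _).mp hw) r,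
              pvDropU_not_underscore hu, pvD_bad c _ hbit]
            rfl


def pvTail0 : List Char → Option Int
  | 'b' :: u => pvDigits? (pvDropU u)
  | 'B' :: u => pvDigits? (pvDropU u)
  | v => pvDigitsGo 0 v


theorem pvTail0_default {c : Char} (hb : c ≠ 'b') (hB : c ≠ 'B') (v : List Char) :
    pvTail0 (c :: v) = pvDigitsGo 0 (c :: v) := by
  rw [pvTail0.eq_def]
  split <;> simp_all

theorem pvFoldl_zero (t : List Char) :
    pvFin (t.foldl pvStep .zero) = pvTail0 (pvRstrip t) := by
  cases t with
  | nil => rfl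
  | cons c r =>
    by_cases hb : c = 'b'
    · subst hb
      rw [List.foldl_cons, show pvStep .zero 'b' = .pre by simp [pvStep], pvFoldl_pre r,
        pvRstrip_cons_not_ws (by decide) r]
      rfl
    · by_cases hB : c = 'B'
      · subst hB
        rw [List.foldl_cons, show pvStep .zero 'B' = .pre by simp [pvStep], pvFoldl_pre r,
          pvRstrip_cons_not_ws (by decide) r]
        rfl
      · by_cases h0 : c = '0'
        · subst h0
          rw [List.foldl_cons, show pvStep .zero '0' = .dig 0 by simp [pvStep],
            (pvFoldl_digund r 0).1, pvRstrip_cons_not_ws (by decide) r,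
            pvTail0_default (by decide) (by decide), pvGo0]
          norm_num
        · by_cases h1 : c = '1'
          · subst h1
            rw [List.foldl_cons, show pvStep .zero '1' = .dig 1 by simp [pvStep],
              (pvFoldl_digund r 1).1, pvRstrip_cons_not_ws (by decide) r,
              pvTail0_default (by decide) (by decide), pvGo1]
            norm_num
          · by_cases hu : c = '_'
            · subst hu
              rw [List.foldl_cons, show pvStep .zero '_' = .und 0 by simp [pvStep],
                (pvFoldl_digund r 0).2, pvRstrip_cons_not_ws (by decide) r,
                pvTail0_default (by decide) (by decide)]
            · by_cases hw : pvWs c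
              · have hsp : pvIsSpace c = true := by rw [← pvWs_eq]; exact hw
                have hstep : pvStep .zero c = .trail 0 := by
                  simp [pvStep, hb, hB, h0, h1, hu, hw]
                rw [List.foldl_cons, hstep, pvFoldl_trail r 0, pvRstrip_cons_ws hsp r]
                by_cases hnil : pvRstrip r = []
                · rw [if_pos hnil, if_pos ((pvRstrip_eq_nil_iff r).mp hnil)]
                  rfl
                · rw [if_neg hnil, if_neg (fun hall => hnil ((pvRstrip_eq_nil_iff r).mpr hall)),
                    pvTail0_default hb hB, pvGo_bad 0 c _ (pvBit?_none_of_ws c hw) hu]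
              · have hbit : pvBit? c = none := by simp [pvBit?, h0, h1]
                have hstep : pvStep .zero c = .bad := by
                  simp [pvStep, hb, hB, h0, h1, hu, hw]
                rw [List.foldl_cons, hstep, pvFoldl_bad,
                  pvRstrip_cons_not_ws (by rw [← pvWs_eq]; exact (Bool.not_eq_true _).mp hw) r,
                  pvTail0_default hb hB, pvGo_bad 0 c _ hbit hu]
                rfl


def pvTailS : List Char → Option Int
  | '0' :: 'b' :: u => pvDigits? (pvDropU u)
  | '0' :: 'B' :: u => pvDigits? (pvDropU u)
  | v => pvDigits? v


theorem pvTailS_zero (v : List Char) : pvTailS ('0' :: v) = pvTail0 v := by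
  cases v with
  | nil => rfl
  | cons d u =>
    by_cases hb : d = 'b'
    · subst hb; rfl
    · by_cases hB : d = 'B'
      · subst hB; rfl
      · have e1 : pvTailS ('0' :: d :: u) = pvDigits? ('0' :: d :: u) := by
          rw [pvTailS.eq_def]
          split <;> simp_all
        rw [e1, pvD0, pvTail0_default hb hB]

theorem pvTailS_not0 {c : Char} (h : c ≠ '0') (v : List Char) :
    pvTailS (c :: v) = pvDigits? (c :: v) := by
  rw [pvTailS.eq_def]
  split <;> simp_all

theorem pvFoldl_signed (t : List Char) :
    pvFin (t.foldl pvStep .signed) = pvTailS (pvRstrip t) := by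
  cases t with
  | nil => rfl
  | cons c r =>
    by_cases h0 : c = '0'
    · subst h0
      rw [List.foldl_cons, show pvStep .signed '0' = .zero from rfl, pvFoldl_zero r,
        pvRstrip_cons_not_ws (by decide) r, pvTailS_zero]
    · by_cases h1 : c = '1'
      · subst h1
        rw [List.foldl_cons, show pvStep .signed '1' = .dig 1 from rfl, (pvFoldl_digund r 1).1,
          pvRstrip_cons_not_ws (by decide) r, pvTailS_not0 (by decide), pvD1]
      · have hbit : pvBit? c = none := by simp [pvBit?, h0, h1]
        have hstep : pvStep .signed c = .bad := by simp [pvStep, h0, h1]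
        rw [List.foldl_cons, hstep, pvFoldl_bad]
        by_cases hw : pvIsSpace c
        · rw [pvRstrip_cons_ws hw r]
          by_cases hnil : pvRstrip r = []
          · rw [if_pos hnil]; rfl
          · rw [if_neg hnil, pvTailS_not0 h0, pvD_bad c _ hbit]
            rfl
        · rw [pvRstrip_cons_not_ws ((Bool.not_eq_true _).mp hw) r,
            pvTailS_not0 h0, pvD_bad c _ hbit]
          rfl


theorem pvInner_eq (u : List Char) :
    (match u with | '_' :: u' => u' | _ => u) = pvDropU u := by
  cases u with
  | nil => rfl
  | cons d w =>
    by_cases hd : d = '_'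
    · subst hd; rfl
    · rw [pvDropU_not_underscore hd]
      split <;> simp_all

theorem pvSignStrip_not_plus {c : Char} (h : c ≠ '+') (u : List Char) :
    pvSignStrip (c :: u) = c :: u := by
  rw [pvSignStrip.eq_def]
  split <;> simp_all

theorem pvSign_eq (t : List Char) :
    (match t with | '+' :: rest => rest | _ => t) = pvSignStrip t := by
  cases t with
  | nil => rfl
  | cons c u =>
    by_cases h : c = '+'
    · subst h; rfl
    · rw [pvSignStrip_not_plus h]
      split <;> simp_all

theorem pvOuter_eq (t : List Char) :
    (match t with
      | '0' :: 'b' :: u => pvDigits? (match u with | '_' :: u' => u' | _ => u)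
      | '0' :: 'B' :: u => pvDigits? (match u with | '_' :: u' => u' | _ => u)
      | _ => pvDigits? t) = pvTailS t := by
  cases t with
  | nil => rfl
  | cons c w =>
    by_cases h0 : c = '0'
    · subst h0
      cases w with
      | nil => rfl
      | cons d v =>
        by_cases hb : d = 'b'
        · subst hb
          show pvDigits? (match v with | '_' :: u' => u' | _ => v) = _
          rw [pvInner_eq v]
          rfl
        · by_cases hB : d = 'B'
          · subst hB
            show pvDigits? (match v with | '_' :: u' => u' | _ => v) = _
            rw [pvInner_eq v]
            rfl
          · have hr : pvTailS ('0' :: d :: v) = pvDigits? ('0' :: d :: v) := by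
              rw [pvTailS.eq_def]
              split <;> simp_all
            rw [hr]
            split <;> simp_all
    · rw [pvTailS_not0 h0]
      split <;> simp_all

theorem pvParseBin?_eq (s : List Char) :
    pvParseBin? s = pvTailS (pvSignStrip (pvRstrip (s.dropWhile pvIsSpace))) := by
  unfold pvParseBin?
  rw [← pvOuter_eq, ← pvSign_eq]
  rfl



theorem pvFoldl_lead_dropWhile (t : List Char) :
    t.foldl pvStep .lead = (t.dropWhile pvWs).foldl pvStep .lead := by
  induction t with
  | nil => rfl
  | cons c r ih =>
    by_cases h : pvWs c
    · rw [List.foldl_cons, show pvStep .lead c = .lead by simp [pvStep, h], ih,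
        List.dropWhile_cons_of_pos h]
    · rw [List.dropWhile_cons_of_neg h]

theorem pvDropWhile_head (p : Char → Bool) : ∀ (s : List Char) (c : Char) (w : List Char),
    s.dropWhile p = c :: w → p c = false := by
  intro s
  induction s with
  | nil => intro c w h; simp at h
  | cons a r ih =>
    intro c w h
    by_cases hp : p a
    · rw [List.dropWhile_cons_of_pos hp] at h
      exact ih c w h
    · rw [List.dropWhile_cons_of_neg hp] at h
      injection h with h1 _
      subst h1
      exact (Bool.not_eq_true _).mp hp

theorem pvParseB_eq (s : List Char) : pvParseB s = pvParseBin s := by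
  unfold pvParseB pvParseBin
  rw [pvParseBin?_eq, pvFoldl_lead_dropWhile, pvWs_eq]
  congr 1
  cases hu : s.dropWhile pvIsSpace with
  | nil => rfl
  | cons c w =>
    have hns : pvIsSpace c = false := pvDropWhile_head pvIsSpace s c w hu
    by_cases hp : c = '+'
    · subst hp
      rw [List.foldl_cons, show pvStep .lead '+' = .signed from rfl, pvFoldl_signed w,
        pvRstrip_cons_not_ws (by decide) w]
      rfl
    · rw [pvRstrip_cons_not_ws hns w, pvSignStrip_not_plus hp]
      by_cases h0 : c = '0'
      · subst h0
        rw [List.foldl_cons, show pvStep .lead '0' = .zero from rfl, pvFoldl_zero w,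
          pvTailS_zero]
      · by_cases h1 : c = '1'
        · subst h1
          rw [List.foldl_cons, show pvStep .lead '1' = .dig 1 from rfl,
            (pvFoldl_digund w 1).1, pvTailS_not0 (by decide), pvD1]
        · have hbit : pvBit? c = none := by simp [pvBit?, h0, h1]
          have hstep : pvStep .lead c = .bad := by
            simp [pvStep, pvWs_eq, hns, hp, h0, h1]
          rw [List.foldl_cons, hstep, pvFoldl_bad, pvTailS_not0 h0, pvD_bad c _ hbit]
          rfl


-- ---------- B-side characterisation ----------

theorem pvCovered_mem : ∀ (f : Nat) (s : List Char), s.count '-' ≤ f → ∀ k : Int,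
    (k ∈ pvCovered f s ↔ ∃ bs ∈ pvAllBits (s.count '-'), k = pvParseBin (pvSubstAll s bs)) := by
  intro f
  induction f with
  | zero =>
    intro s hc k
    have hc0 : s.count '-' = 0 := by omega
    have hnone : List.idxOf? '-' s = none := by
      rw [List.idxOf?_eq_none_iff]
      intro hmem
      have := List.count_pos_iff.mpr hmem
      omega
    rw [pvCovered.eq_def]
    dsimp only
    rw [hnone, hc0]
    simp [pvAllBits, pvSubstAll_nil, pvParseB_eq]
  | succ n ih =>
    intro s hc k
    cases hir : List.idxOf? '-' s with
    | none =>
      have hc0 : s.count '-' = 0 := by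
        simpa [List.count_eq_zero] using List.idxOf?_eq_none_iff.mp hir
      rw [pvCovered.eq_def]
      dsimp only
      rw [hir, hc0]
      simp [pvAllBits, pvSubstAll_nil, pvParseB_eq]
    | some i =>
      have hmem : '-' ∈ s := by
        obtain ⟨hlen, hget, -⟩ := List.idxOf?_eq_some_iff.mp hir
        exact hget ▸ List.getElem_mem hlen
      have hs1 : 1 ≤ s.count '-' := List.count_pos_iff.mpr hmem
      obtain ⟨c, hc'⟩ : ∃ c, s.count '-' = c + 1 := ⟨s.count '-' - 1, by omega⟩
      have h0 : s.take i ++ ['0'] ++ s.drop (i + 1) = pvRep1 s '0' := (pvRep1_some hir '0').symm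
      have h1 : s.take i ++ ['1'] ++ s.drop (i + 1) = pvRep1 s '1' := (pvRep1_some hir '1').symm
      have hc0 : (pvRep1 s '0').count '-' = c := by rw [pvRep1_count '0' hs1 (by decide)]; omega
      have hc1 : (pvRep1 s '1').count '-' = c := by rw [pvRep1_count '1' hs1 (by decide)]; omega
      have e0 : ∀ bs, pvSubstAll (pvRep1 s '0') bs = pvSubstAll s ('0' :: bs) :=
        fun bs => pvSubstAll_rep1 s '0' bs hs1 (by decide)
      have e1 : ∀ bs, pvSubstAll (pvRep1 s '1') bs = pvSubstAll s ('1' :: bs) :=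
        fun bs => pvSubstAll_rep1 s '1' bs hs1 (by decide)
      rw [pvCovered.eq_def]
      dsimp only
      rw [hir]
      dsimp only
      rw [h0, h1, PySem.Set.mem_union,
        ih (pvRep1 s '0') (by rw [hc0]; omega) k, ih (pvRep1 s '1') (by rw [hc1]; omega) k,
        hc0, hc1, hc']
      simp only [e0, e1, pvAllBits, List.mem_append, List.mem_map]
      constructor
      · rintro (⟨bs, hbs, rfl⟩ | ⟨bs, hbs, rfl⟩)
        · exact ⟨'0' :: bs, Or.inl ⟨bs, hbs, rfl⟩, rfl⟩
        · exact ⟨'1' :: bs, Or.inr ⟨bs, hbs, rfl⟩, rfl⟩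
      · rintro ⟨bs, (⟨t, ht, rfl⟩ | ⟨t, ht, rfl⟩), rfl⟩
        · exact Or.inl ⟨t, ht, rfl⟩
        · exact Or.inr ⟨t, ht, rfl⟩


-- ---------- clearing as a single map pass ----------

theorem pvClearKey_keys (k : Int) (d : List (Int × List Int)) :
    (pvClearKey k d).map Prod.fst = d.map Prod.fst := by
  induction d with
  | nil => rfl
  | cons kv rest ih =>
    obtain ⟨a, v⟩ := kv
    by_cases h : a = k <;> simp [pvClearKey, h, ih]

theorem pvMapClear_id (k : Int) (d : List (Int × List Int)) (h : ∀ kv ∈ d, kv.1 ≠ k) :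
    d.map (fun kv => if kv.1 = k then (kv.1, ([] : List Int)) else kv) = d := by
  induction d with
  | nil => rfl
  | cons kv rest ih =>
    rw [List.map_cons, if_neg (h kv (by simp)), ih (fun x hx => h x (by simp [hx]))]


theorem pvClearKey_eq_map (k : Int) (d : List (Int × List Int)) (h : (d.map Prod.fst).Nodup) :
    pvClearKey k d = d.map (fun kv => if kv.1 = k then (kv.1, ([] : List Int)) else kv) := by
  induction d with
  | nil => rfl
  | cons kv rest ih =>
    obtain ⟨a, v⟩ := kv
    simp only [List.map_cons, List.nodup_cons] at h
    by_cases hk : a = k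
    · subst hk
      rw [show pvClearKey a ((a, v) :: rest) = (a, []) :: rest from by simp [pvClearKey],
        List.map_cons, if_pos rfl,
        pvMapClear_id a rest (fun kv hkv => fun he => h.1 (he ▸ List.mem_map_of_mem hkv))]
    · rw [show pvClearKey k ((a, v) :: rest) = (a, v) :: pvClearKey k rest from by
        simp [pvClearKey, hk], List.map_cons, if_neg hk, ih h.2]


theorem pvFoldl_clear_eq_map (L : List Int) : ∀ d : List (Int × List Int),
    (d.map Prod.fst).Nodup →
    L.foldl (fun d k => pvClearKey k d) d =
      d.map (fun kv => if kv.1 ∈ L then (kv.1, ([] : List Int)) else kv) := by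
  induction L with
  | nil =>
    intro d hd
    simp
  | cons k L ih =>
    intro d hd
    rw [List.foldl_cons]
    have hd2 : ((pvClearKey k d).map Prod.fst).Nodup := by
      rw [pvClearKey_keys]; exact hd
    rw [ih (pvClearKey k d) hd2, pvClearKey_eq_map k d hd, List.map_map]
    refine List.map_congr_left fun kv _ => ?_
    simp only [Function.comp]
    by_cases h1 : kv.1 = k
    · by_cases h2 : kv.1 ∈ L <;> simp [h1, List.mem_cons]
    · by_cases h2 : kv.1 ∈ L <;> simp [h1, h2, List.mem_cons]


-- ===== VERDICT (by name: the statement is the Claim_ definition above) =====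
theorem except_pi_minterm_spec : Claim_equal_except_pi_minterm := by
  intro pi cnt _ hpre
  obtain ⟨-, hnodup, -⟩ := hpre
  unfold Spec_except_pi_minterm except_pi_minterm_alt
  rw [pvA_eq]
  have hfold :
      ((pvAllBits (pi.toList.count '-')).map
          (fun bs => pvParseBin (pvSubstAll pi.toList bs))).foldl
        (fun d k => pvClearKey k d) cnt
      = (pvAllBits (pi.toList.count '-')).foldl
          (fun d bs => pvClearKey (pvParseBin (pvSubstAll pi.toList bs)) d) cnt := by
    rw [List.foldl_map]
  rw [← hfold,
    pvFoldl_clear_eq_map ((pvAllBits (pi.toList.count '-')).map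
      (fun bs => pvParseBin (pvSubstAll pi.toList bs))) cnt hnodup]
  rw [pvFoldl_clear_eq_map (pvCovered (pi.toList.count '-') pi.toList) cnt hnodup]
  refine List.map_congr_left fun kv _ => ?_
  have hiff : kv.1 ∈ pvCovered (pi.toList.count '-') pi.toList
      ↔ kv.1 ∈ (pvAllBits (pi.toList.count '-')).map
          (fun bs => pvParseBin (pvSubstAll pi.toList bs)) := by
    rw [pvCovered_mem (pi.toList.count '-') pi.toList (le_refl _) kv.1, List.mem_map]
    exact exists_congr fun bs => and_congr_right fun _ => eq_comm
  by_cases h : kv.1 ∈ (pvAllBits (pi.toList.count '-')).map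
      (fun bs => pvParseBin (pvSubstAll pi.toList bs))
  · rw [if_pos h, if_pos (hiff.mpr h)]
  · rw [if_neg h, if_neg (fun hb => h (hiff.mp hb))]
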